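-- pv_equiv track=rewrite | github.com/bintangpraa28/UGM_PPROKOM_BINTANG | pertemuan 9/tugas6.py | cari
-- ===== SOURCE A (Python) =====
-- def cari(angka_list):
--     genap = []
--     ganjil = []
--     jumlah_genap = 0
--     jumlah_ganjil = 0
--
--     for angka in angka_list:
--         if angka % 2 == 0:
--             genap.append(angka)
--             jumlah_genap += angka
--         else:
--             ganjil.append(angka)
--             jumlah_ganjil += angka
--
--     return genap, ganjil, jumlah_genap, jumlah_ganjil
-- ===== SOURCE B (Python) =====
-- def cari(angka_list):
--     genap = [x for x in angka_list if x % 2 == 0]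
--     ganjil = [x for x in angka_list if x % 2 != 0]
--     return genap, ganjil, sum(genap), sum(ganjil)
-- ===== Notes on version B (the rewrite author's own statement) =====
-- stated objective: simpler
-- what changed: Replaces the single fused loop with four mutable accumulators by two filtering comprehensions plus the sum builtin (multi-pass, no manual state).
import Mathlib
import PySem

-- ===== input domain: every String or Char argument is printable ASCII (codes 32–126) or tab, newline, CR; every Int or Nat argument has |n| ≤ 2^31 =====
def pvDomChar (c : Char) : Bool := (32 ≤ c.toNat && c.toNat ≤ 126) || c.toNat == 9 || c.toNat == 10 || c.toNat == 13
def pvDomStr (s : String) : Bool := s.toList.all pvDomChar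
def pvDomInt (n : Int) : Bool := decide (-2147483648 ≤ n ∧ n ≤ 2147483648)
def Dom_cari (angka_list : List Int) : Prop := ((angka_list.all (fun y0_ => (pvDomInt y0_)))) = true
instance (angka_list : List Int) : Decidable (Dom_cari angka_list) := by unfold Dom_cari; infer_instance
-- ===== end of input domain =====

-- B replaces A's single fused loop with mutable accumulators by two filters plus sums (simpler decomposition).

-- ===== PORT A =====
-- one fold over the list carrying (genap, ganjil, jumlah_genap, jumlah_ganjil)
def cari (angka_list : List Int) : List Int × List Int × Int × Int :=
  angka_list.foldl
    (fun s angka =>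
      if PySem.Int.mod angka 2 = 0 then
        (s.1 ++ [angka], s.2.1, s.2.2.1 + angka, s.2.2.2)
      else
        (s.1, s.2.1 ++ [angka], s.2.2.1, s.2.2.2 + angka))
    ([], [], 0, 0)

-- ===== PORT B =====
-- two filtering comprehensions and the sum builtin
def cari_alt (angka_list : List Int) : List Int × List Int × Int × Int :=
  let genap := angka_list.filter (fun x => PySem.Int.mod x 2 = 0)
  let ganjil := angka_list.filter (fun x => ¬ (PySem.Int.mod x 2 = 0))
  (genap, ganjil, genap.sum, ganjil.sum)

-- ===== PRECONDITION & SPEC =====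
def Spec_cari (angka_list : List Int) (out : List Int × List Int × Int × Int) : Prop := out = cari_alt angka_list
instance (angka_list : List Int) (out : List Int × List Int × Int × Int) : Decidable (Spec_cari angka_list out) := by unfold Spec_cari; infer_instance

-- ===== CLAIM (what is proved, stated in full; the proofs are below) =====
def Claim_equal_cari : Prop := ∀ (angka_list : List Int), Dom_cari angka_list → Spec_cari angka_list (cari angka_list)

-- ===== LEMMAS AND PROOFS =====

theorem cari_fold_inv (l : List Int) (g gj : List Int) (sg sgj : Int) :
    l.foldl
      (fun (s : List Int × List Int × Int × Int) angka =>
        if PySem.Int.mod angka 2 = 0 then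
          (s.1 ++ [angka], s.2.1, s.2.2.1 + angka, s.2.2.2)
        else
          (s.1, s.2.1 ++ [angka], s.2.2.1, s.2.2.2 + angka))
      (g, gj, sg, sgj)
    = (g ++ l.filter (fun x => decide (PySem.Int.mod x 2 = 0)),
       gj ++ l.filter (fun x => decide (¬ (PySem.Int.mod x 2 = 0))),
       sg + (l.filter (fun x => decide (PySem.Int.mod x 2 = 0))).sum,
       sgj + (l.filter (fun x => decide (¬ (PySem.Int.mod x 2 = 0)))).sum) := by
  induction l generalizing g gj sg sgj with
  | nil => simp
  | cons a t ih =>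
    rw [List.foldl_cons]
    by_cases h : PySem.Int.mod a 2 = 0
    · rw [if_pos h, ih]
      simp only [List.filter_cons, h, decide_true, not_true_eq_false, decide_false,
        if_true, List.sum_cons, List.append_assoc, List.singleton_append,
        Prod.mk.injEq, add_assoc]
      simp
    · rw [if_neg h, ih]
      simp only [List.filter_cons, h, decide_false, not_false_eq_true, decide_true,
        if_true, List.sum_cons, List.append_assoc, List.singleton_append,
        Prod.mk.injEq, add_assoc]
      simp

-- ===== VERDICT (by name: the statement is the Claim_ definition above) =====
theorem cari_spec : Claim_equal_cari := by
  intro l _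
  show cari l = cari_alt l
  show cari l = cari_alt l
  rw [cari, cari_alt, cari_fold_inv]
  simp
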